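-- pv_equiv track=rewrite | github.com/woodaekki/SSAFY | baekjoon/10709_forcaster.py | forcaster
-- ===== SOURCE A (Python) =====
-- def forcaster(h, w, arr):
--     new_arr = [[-1] * w for _ in range(h)]
--
--     for i in range(h):
--         for j in range(w):
--             if arr[i][j] == 'c':
--                 new_arr[i][j] = 0
--                 k = j+1
--                 while k < w and arr[i][k] == '.':
--                     new_arr[i][k] = new_arr[i][k-1] + 1
--                     k += 1
--     return new_arr
-- ===== SOURCE B (Python) =====
-- def forcaster(h, w, arr):
--     result = []
--     append_row = result.append
--     wrange = range(w)
--     for i in range(h):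
--         out = []
--         append = out.append
--         dist = None  # distance since the last cloud; None = no cloud seen / blocked
--         for j in wrange:
--             cell = arr[i][j]
--             if cell == 'c':
--                 dist = 0
--                 append(0)
--             elif cell == '.' and dist is not None:
--                 dist += 1
--                 append(dist)
--             else:
--                 dist = None
--                 append(-1)
--         append_row(out)
--     return result
-- ===== Notes on version B (the rewrite author's own statement) =====
-- stated objective: simpler
-- what changed: Replaced A's pre-filled -1 matrix with a find-a-cloud-then-inner-while-fill per cell by a single flat left-to-right scan per row that maintains one running distance accumulator (None = no active cloud), appending each output cell once.
import Mathlib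
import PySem

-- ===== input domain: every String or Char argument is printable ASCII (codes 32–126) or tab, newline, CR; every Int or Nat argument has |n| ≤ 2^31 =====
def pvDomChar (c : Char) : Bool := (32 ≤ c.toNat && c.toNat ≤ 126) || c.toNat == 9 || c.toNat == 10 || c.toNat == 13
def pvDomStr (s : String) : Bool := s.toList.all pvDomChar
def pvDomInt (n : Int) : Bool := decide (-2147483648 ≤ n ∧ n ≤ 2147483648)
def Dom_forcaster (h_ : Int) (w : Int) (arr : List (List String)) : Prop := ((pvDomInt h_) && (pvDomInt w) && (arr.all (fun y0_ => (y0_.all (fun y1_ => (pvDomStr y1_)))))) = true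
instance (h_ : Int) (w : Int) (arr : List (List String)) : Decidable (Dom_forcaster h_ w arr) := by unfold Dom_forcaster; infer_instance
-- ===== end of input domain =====

-- B replaces A's find-a-cloud-then-inner-while-fill per cell by a single flat
-- left-to-right accumulator scan per row (objective: simpler).

-- ===== PORT A =====
-- inner 'while k < w and arr[i][k] == '.': new_arr[i][k] = new_arr[i][k-1] + 1; k += 1'
def fillA (cells : List String) (w : Int) (k : Int) (row : List Int) : List Int :=
  if h : k < w ∧ PySem.List.pyGetD cells k "" = "." then
    fillA cells w (k + 1) (PySem.List.pySetD row k (PySem.List.pyGetD row (k - 1) 0 + 1))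
  else row
termination_by (w - k).toNat
decreasing_by omega

-- one row of A: new_arr[i] starts as [-1]*w; for j in range(w): if arr[i][j]=='c' then set 0 and fill
def rowA (cells : List String) (w : Int) : List Int :=
  (PySem.List.pyRange 0 w 1).foldl
    (fun row j =>
      if PySem.List.pyGetD cells j "" = "c" then
        fillA cells w (j + 1) (PySem.List.pySetD row j 0)
      else row)
    (List.replicate w.toNat (-1))

def forcaster (h_ : Int) (w : Int) (arr : List (List String)) : List (List Int) :=
  (PySem.List.pyRange 0 h_ 1).map (fun i => rowA (PySem.List.pyGetD arr i []) w)

-- ===== PORT B =====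
-- one row of B: for j in range(w): single scan with accumulator dist (none = no active cloud)
def rowB (cells : List String) (w : Int) : List Int :=
  ((PySem.List.pyRange 0 w 1).foldl
    (fun (st : List Int × Option Int) j =>
      let cell := PySem.List.pyGetD cells j ""
      if cell = "c" then (st.1 ++ [0], some 0)
      else if cell = "." then
        match st.2 with
        | some d => (st.1 ++ [d + 1], some (d + 1))
        | none => (st.1 ++ [-1], none)
      else (st.1 ++ [-1], none))
    ([], none)).1

def forcaster_alt (h_ : Int) (w : Int) (arr : List (List String)) : List (List Int) :=
  (PySem.List.pyRange 0 h_ 1).map (fun i => rowB (PySem.List.pyGetD arr i []) w)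

-- ===== PRECONDITION & SPEC =====
-- Pre_ excludes exactly the inputs on which A raises IndexError (a row index ≥ len(arr)
-- or a cell index ≥ len(row) actually reached, i.e. when h_ > 0 and w > 0).
def Pre_forcaster (h_ : Int) (w : Int) (arr : List (List String)) : Prop :=
  0 < h_ → 0 < w →
    (h_ ≤ (arr.length : Int) ∧ ∀ row ∈ arr.take h_.toNat, w ≤ (row.length : Int))
instance (h_ : Int) (w : Int) (arr : List (List String)) : Decidable (Pre_forcaster h_ w arr) := by
  unfold Pre_forcaster; infer_instance

def pvWitness_forcaster : Int × Int × List (List String) :=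
  (2, 3, [["c", ".", "."], [".", "c", "x"]])

def Spec_forcaster (h_ : Int) (w : Int) (arr : List (List String)) (out : List (List Int)) : Prop := out = forcaster_alt h_ w arr
instance (h_ : Int) (w : Int) (arr : List (List String)) (out : List (List Int)) : Decidable (Spec_forcaster h_ w arr out) := by unfold Spec_forcaster; infer_instance

-- ===== CLAIM (what is proved, stated in full; the proofs are below) =====
def Claim_equal_forcaster : Prop := ∀ (h_ : Int) (w : Int) (arr : List (List String)), Dom_forcaster h_ w arr → Pre_forcaster h_ w arr → Spec_forcaster h_ w arr (forcaster h_ w arr)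

-- ===== LEMMAS AND PROOFS =====

-- the common specification: one structural scan over the row's cells
def scanRow : Option Int → List String → List Int
  | _, [] => []
  | d, x :: rest =>
    if x = "c" then 0 :: scanRow (some 0) rest
    else if x = "." then
      match d with
      | some n => (n + 1) :: scanRow (some (n + 1)) rest
      | none => (-1) :: scanRow none rest
    else (-1) :: scanRow none rest

-- the accumulator after scanning a list
def scanState : Option Int → List String → Option Int
  | d, [] => d
  | d, x :: rest =>
    if x = "c" then scanState (some 0) rest
    else if x = "." then
      match d with
      | some n => scanState (some (n + 1)) rest
      | none => scanState none rest
    else scanState none rest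

-- cells from position j on have 'c' censored (not yet processed by A's outer loop)
def censor (s : String) : String := if s = "c" then "x" else s

theorem length_scanRow (d : Option Int) (l : List String) : (scanRow d l).length = l.length := by
  induction l generalizing d with
  | nil => rfl
  | cons x rest ih =>
    simp only [scanRow]
    split_ifs with h1 h2
    · simp [ih]
    · cases d <;> simp [ih]
    · simp [ih]

theorem scanRow_append (d : Option Int) (xs ys : List String) :
    scanRow d (xs ++ ys) = scanRow d xs ++ scanRow (scanState d xs) ys := by
  induction xs generalizing d with
  | nil => simp [scanRow, scanState]
  | cons x rest ih =>
    simp only [List.cons_append, scanRow, scanState]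
    split_ifs with h1 h2
    · simp [ih]
    · cases d <;> simp [ih]
    · simp [ih]

theorem scanState_append (d : Option Int) (xs ys : List String) :
    scanState d (xs ++ ys) = scanState (scanState d xs) ys := by
  induction xs generalizing d with
  | nil => simp [scanState]
  | cons x rest ih =>
    simp only [List.cons_append, scanState]
    split_ifs with h1 h2
    · simp [ih]
    · cases d <;> simp [ih]
    · simp [ih]

theorem censor_ne_c (s : String) : censor s ≠ "c" := by
  unfold censor; split_ifs with h <;> simp_all

theorem censor_eq_dot_iff (s : String) : censor s = "." ↔ s = "." := by
  unfold censor; split_ifs with h <;> simp_all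

theorem scanRow_none_censor (l : List String) :
    scanRow none (l.map censor) = List.replicate l.length (-1) := by
  induction l with
  | nil => rfl
  | cons x rest ih =>
    simp only [List.map_cons, scanRow]
    have hc := censor_ne_c x
    split_ifs with h1 h2 <;> simp_all [List.replicate_succ]

-- any state scanning a censored head behaves like none after it when head was 'c'
theorem scanRow_censor_c (d : Option Int) (rest : List String) :
    scanRow d (censor "c" :: rest) = -1 :: scanRow none rest := by
  cases d <;> simp [censor, scanRow]

-- the inner while loop of A extends the scan with an active accumulator
theorem fillA_scan (cells : List String) (w : Int) (hw : w ≤ (cells.length : Int)) :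
    ∀ (b : Int) (T : List String) (Q : List Int) (d : Int),
      1 ≤ b → b ≤ w → Q.length = b.toNat →
      T = ((cells.take w.toNat).drop b.toNat).map censor →
      PySem.List.pyGetD Q (b - 1) 0 = d →
      fillA cells w b (Q ++ scanRow none T) = Q ++ scanRow (some d) T := by
  intro b T Q d hb hbw hQ hT hd
  by_cases hlt : b < w
  · -- T is nonempty, head = censor cells[b]
    have hbn : b.toNat < w.toNat := by omega
    have hbl : b.toNat < cells.length := by omega
    have hdrop : (cells.take w.toNat).drop b.toNat
        = cells[b.toNat] :: (cells.take w.toNat).drop (b.toNat + 1) := by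
      rw [List.drop_eq_getElem_cons (by simp; omega)]
      simp [List.getElem_take]
    have hget : PySem.List.pyGetD cells b "" = cells[b.toNat] :=
      PySem.List.pyGetD_eq_getElem _ _ (by omega) (by omega)
    by_cases hdot : cells[b.toNat] = "."
    · -- loop continues
      rw [fillA]
      rw [dif_pos ⟨hlt, by rw [hget]; exact hdot⟩]
      have hTc : T = "." :: ((cells.take w.toNat).drop (b.toNat + 1)).map censor := by
        rw [hT, hdrop]; simp [censor, hdot]
      have hscanN : scanRow none T = -1 :: scanRow none (((cells.take w.toNat).drop (b.toNat + 1)).map censor) := by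
        rw [hTc]; simp [scanRow]
      have hset : PySem.List.pySetD (Q ++ scanRow none T) b
          (PySem.List.pyGetD (Q ++ scanRow none T) (b - 1) 0 + 1)
          = (Q ++ [d + 1]) ++ scanRow none (((cells.take w.toNat).drop (b.toNat + 1)).map censor) := by
        have hprev : PySem.List.pyGetD (Q ++ scanRow none T) (b - 1) 0 = d := by
          have h1 : (0:Int) ≤ b - 1 := by omega
          have h2 : (b - 1).toNat < Q.length := by omega
          rw [PySem.List.pyGetD_eq_getElem _ _ h1 (by simp; omega)]
          rw [List.getElem_append_left h2]
          rw [← hd, PySem.List.pyGetD_eq_getElem _ _ h1 (by omega)]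
        rw [hprev, PySem.List.pySetD_of_nonneg _ _ (by omega : (0:Int) ≤ b)]
        rw [hscanN]
        rw [List.set_append_right _ _ (by omega)]
        rw [hQ]
        simp
      rw [hset]
      have := fillA_scan cells w hw (b + 1)
        (((cells.take w.toNat).drop (b.toNat + 1)).map censor) (Q ++ [d + 1]) (d + 1)
        (by omega) (by omega) (by simp [hQ]; omega)
        (by have h21 : (b + 1).toNat = b.toNat + 1 := by omega
            rw [h21])
        (by have : b + 1 - 1 = b := by omega
            rw [this, PySem.List.pyGetD_eq_getElem _ _ (by omega) (by simp; omega)]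
            rw [List.getElem_append_right (by omega)]
            simp [hQ])
      rw [this]
      rw [hTc]
      simp [scanRow, censor]
    · -- loop stops: head is not '.', both scans emit -1 then reset
      rw [fillA]
      rw [dif_neg (by rw [hget]; tauto)]
      have hcens : censor cells[b.toNat] ≠ "c" := censor_ne_c _
      have hcens2 : censor cells[b.toNat] ≠ "." := by
        rw [Ne, censor_eq_dot_iff]; exact hdot
      rw [hT, hdrop]
      simp only [List.map_cons, scanRow]
      rw [if_neg hcens, if_neg hcens2, if_neg hcens, if_neg hcens2]
  · -- b = w : T = []
    have hTnil : T = [] := by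
      rw [hT]
      have hd : (cells.take w.toNat).drop b.toNat = [] := by
        rw [List.drop_eq_nil_iff]
        simp
        omega
      simp [hd]
    subst hTnil
    rw [fillA]
    rw [dif_neg (by omega)]
    simp [scanRow]
termination_by b => (w - b).toNat
decreasing_by omega

-- A's outer loop: invariant = scan of the partially-censored row
theorem rowA_inv (cells : List String) (w : Int) (hw : w ≤ (cells.length : Int)) :
    ∀ (a : Int), 0 ≤ a →
      (PySem.List.pyRange a w 1).foldl
        (fun row j =>
          if PySem.List.pyGetD cells j "" = "c" then
            fillA cells w (j + 1) (PySem.List.pySetD row j 0)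
          else row)
        (scanRow none ((cells.take w.toNat).take a.toNat
          ++ ((cells.take w.toNat).drop a.toNat).map censor))
      = scanRow none (cells.take w.toNat) := by
  intro a ha
  by_cases hlt : a < w
  · rw [PySem.List.pyRange_one_cons hlt]
    have han : a.toNat < w.toNat := by omega
    have hal : a.toNat < cells.length := by omega
    have halt : a.toNat < (cells.take w.toNat).length := by simp; omega
    have hget : PySem.List.pyGetD cells a "" = cells[a.toNat] :=
      PySem.List.pyGetD_eq_getElem _ _ ha (by omega)
    have hcell : (cells.take w.toNat)[a.toNat] = cells[a.toNat] := List.getElem_take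
    have hdrop : (cells.take w.toNat).drop a.toNat
        = cells[a.toNat] :: (cells.take w.toNat).drop (a.toNat + 1) := by
      rw [List.drop_eq_getElem_cons halt, hcell]
    have htake : (cells.take w.toNat).take (a.toNat + 1)
        = (cells.take w.toNat).take a.toNat ++ [cells[a.toNat]] := by
      rw [List.take_add_one]
      simp [List.getElem?_eq_getElem halt, hcell]
    simp only [List.foldl_cons]
    by_cases hc : cells[a.toNat] = "c"
    · rw [if_pos (by rw [hget]; exact hc)]
      -- the set + fill step moves the censor boundary one to the right
      set P := scanRow none ((cells.take w.toNat).take a.toNat) with hP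
      set s := scanState none ((cells.take w.toNat).take a.toNat) with hs
      have hPlen : P.length = a.toNat := by
        rw [hP, length_scanRow]; simp; omega
      have hsplit : scanRow none ((cells.take w.toNat).take a.toNat
          ++ ((cells.take w.toNat).drop a.toNat).map censor)
          = P ++ (-1) :: scanRow none (((cells.take w.toNat).drop (a.toNat + 1)).map censor) := by
        rw [scanRow_append, ← hP, ← hs, hdrop]
        simp only [List.map_cons, hc]
        rw [scanRow_censor_c]
      have hset : PySem.List.pySetD (scanRow none ((cells.take w.toNat).take a.toNat
          ++ ((cells.take w.toNat).drop a.toNat).map censor)) a 0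
          = P ++ 0 :: scanRow none (((cells.take w.toNat).drop (a.toNat + 1)).map censor) := by
        rw [hsplit, PySem.List.pySetD_of_nonneg _ _ ha]
        rw [List.set_append_right _ _ (by omega), hPlen]
        simp
      rw [hset]
      have hfill := fillA_scan cells w hw (a + 1)
        (((cells.take w.toNat).drop (a.toNat + 1)).map censor) (P ++ [0]) 0
        (by omega) (by omega)
        (by simp only [List.length_append, List.length_cons, List.length_nil, hPlen]; omega)
        (by have h21 : (a + 1).toNat = a.toNat + 1 := by omega
            rw [h21])
        (by have he : a + 1 - 1 = a := by omega
            rw [he, PySem.List.pyGetD_eq_getElem _ _ ha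
              (by simp only [List.length_append, List.length_cons, List.length_nil, hPlen]; push_cast; omega)]
            rw [List.getElem_append_right (by omega)]
            simp [hPlen])
      have hre : P ++ 0 :: scanRow none (((cells.take w.toNat).drop (a.toNat + 1)).map censor)
          = (P ++ [0]) ++ scanRow none (((cells.take w.toNat).drop (a.toNat + 1)).map censor) := by
        simp
      rw [hre, hfill]
      have h1 : scanRow s [cells[a.toNat]] = [0] := by rw [hc]; simp [scanRow]
      have h2 : scanState s [cells[a.toNat]] = some 0 := by rw [hc]; simp [scanState]
      have hnext : (P ++ [0]) ++ scanRow (some 0) (((cells.take w.toNat).drop (a.toNat + 1)).map censor)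
          = scanRow none ((cells.take w.toNat).take (a + 1).toNat
            ++ ((cells.take w.toNat).drop (a + 1).toNat).map censor) := by
        have hto : (a + 1).toNat = a.toNat + 1 := by omega
        rw [hto, htake, List.append_assoc, scanRow_append, scanRow_append, scanState_append,
          ← hs, h1, h2, ← hP]
        simp
      rw [hnext]
      exact rowA_inv cells w hw (a + 1) (by omega)
    · rw [if_neg (by rw [hget]; exact hc)]
      have hsame : (cells.take w.toNat).take a.toNat
            ++ ((cells.take w.toNat).drop a.toNat).map censor
          = (cells.take w.toNat).take (a + 1).toNat
            ++ ((cells.take w.toNat).drop (a + 1).toNat).map censor := by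
        have hto : (a + 1).toNat = a.toNat + 1 := by omega
        rw [hto, htake, hdrop]
        simp [censor, hc]
      rw [hsame]
      exact rowA_inv cells w hw (a + 1) (by omega)
  · rw [PySem.List.pyRange_one_eq_nil (by omega)]
    have h1 : (cells.take w.toNat).take a.toNat = cells.take w.toNat := by
      apply List.take_of_length_le; simp; omega
    have h2 : (cells.take w.toNat).drop a.toNat = [] := by
      simp [List.drop_eq_nil_iff]; omega
    simp [h1, h2]
termination_by a => (w - a).toNat
decreasing_by all_goals omega

theorem rowA_eq_scan (cells : List String) (w : Int) (hw : w ≤ (cells.length : Int)) :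
    rowA cells w = scanRow none (cells.take w.toNat) := by
  unfold rowA
  have h0 := rowA_inv cells w hw 0 le_rfl
  simp only [Int.toNat_zero, List.take_zero, List.drop_zero, List.nil_append] at h0
  rw [← h0]
  congr 1
  rw [scanRow_none_censor]
  simp
  omega

-- B's loop: invariant = emitted prefix ++ scan of the rest with the current accumulator
theorem rowB_inv (cells : List String) (w : Int) (hw : w ≤ (cells.length : Int)) :
    ∀ (a : Int) (out : List Int) (d : Option Int), 0 ≤ a →
      ((PySem.List.pyRange a w 1).foldl
        (fun (st : List Int × Option Int) j =>
          let cell := PySem.List.pyGetD cells j ""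
          if cell = "c" then (st.1 ++ [0], some 0)
          else if cell = "." then
            match st.2 with
            | some n => (st.1 ++ [n + 1], some (n + 1))
            | none => (st.1 ++ [-1], none)
          else (st.1 ++ [-1], none))
        (out, d)).1
      = out ++ scanRow d ((cells.take w.toNat).drop a.toNat) := by
  intro a out d ha
  by_cases hlt : a < w
  · rw [PySem.List.pyRange_one_cons hlt]
    have hal : a.toNat < cells.length := by omega
    have halt : a.toNat < (cells.take w.toNat).length := by simp; omega
    have hget : PySem.List.pyGetD cells a "" = cells[a.toNat] :=
      PySem.List.pyGetD_eq_getElem _ _ ha (by omega)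
    have hdrop : (cells.take w.toNat).drop a.toNat
        = cells[a.toNat] :: (cells.take w.toNat).drop (a.toNat + 1) := by
      rw [List.drop_eq_getElem_cons halt]
      simp [List.getElem_take]
    have hto : (a + 1).toNat = a.toNat + 1 := by omega
    simp only [List.foldl_cons, hget]
    rw [hdrop]
    by_cases hc : cells[a.toNat] = "c"
    · simp only [if_pos hc, scanRow]
      rw [rowB_inv cells w hw (a + 1) _ _ (by omega), hto]
      simp [hc]
    · by_cases hdot : cells[a.toNat] = "."
      · simp only [if_neg hc, if_pos hdot, scanRow]
        cases d with
        | some n =>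
          simp only
          rw [rowB_inv cells w hw (a + 1) _ _ (by omega), hto]
          simp [hc, hdot]
        | none =>
          simp only
          rw [rowB_inv cells w hw (a + 1) _ _ (by omega), hto]
          simp [hc, hdot]
      · simp only [if_neg hc, if_neg hdot, scanRow]
        rw [rowB_inv cells w hw (a + 1) _ _ (by omega), hto]
        simp [hc, hdot]
  · rw [PySem.List.pyRange_one_eq_nil (by omega)]
    have h2 : (cells.take w.toNat).drop a.toNat = [] := by
      simp [List.drop_eq_nil_iff]; omega
    simp [h2, scanRow]
termination_by a => (w - a).toNat
decreasing_by all_goals omega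

theorem rowB_eq_scan (cells : List String) (w : Int) (hw : w ≤ (cells.length : Int)) :
    rowB cells w = scanRow none (cells.take w.toNat) := by
  unfold rowB
  rw [rowB_inv cells w hw 0 [] none le_rfl]
  simp

theorem row_eq_of_nonpos (cells : List String) (w : Int) (hw : w ≤ 0) :
    rowA cells w = rowB cells w := by
  unfold rowA rowB
  rw [PySem.List.pyRange_one_eq_nil (by omega)]
  simp
  omega

-- ===== VERDICT (by name: the statement is the Claim_ definition above) =====
theorem forcaster_spec : Claim_equal_forcaster := by
  intro h_ w arr _hdom hpre
  unfold Spec_forcaster forcaster forcaster_alt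
  apply List.map_congr_left
  intro i hi
  rw [PySem.List.mem_pyRange_one] at hi
  by_cases hw : w ≤ 0
  · exact row_eq_of_nonpos _ w hw
  · have hh : 0 < h_ := by omega
    obtain ⟨hlen, hrows⟩ := hpre hh (by omega)
    have hil : i.toNat < arr.length := by omega
    have hget : PySem.List.pyGetD arr i [] = arr[i.toNat] :=
      PySem.List.pyGetD_eq_getElem _ _ hi.1 (by omega)
    have hmem : arr[i.toNat] ∈ arr.take h_.toNat := by
      rw [List.mem_take_iff_getElem]
      exact ⟨i.toNat, by omega, rfl⟩
    have hwlen := hrows _ hmem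
    rw [hget, rowA_eq_scan _ _ hwlen, rowB_eq_scan _ _ hwlen]
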